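-- pv_equiv track=rewrite | github.com/Sharon271121/Projects | Computational physics/Poisson_s equation 2D/poisson_2D_fortran.py | ddcheby
-- ===== SOURCE A (Python) =====
-- def cheby(m,r):
--   cheby0 = 1
--   cheby1 = r
--   chebyn = 0
--   if m == 0:
--     cheby = cheby0
--   elif m == 1:
--     cheby = cheby1
--   elif m >= 2:
--     for i in range(2, m+1):
--       chebyn = 2*r*cheby1 - cheby0
--       cheby0 = cheby1
--       cheby1 = chebyn
--     cheby = chebyn
--   return cheby
--
-- def dcheby(m,r):
--   dcheby0 = 0
--   dcheby1 = 1
--   dchebyn = 0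
--   if m == 0:
--     dcheby = dcheby0
--   elif m == 1:
--     dcheby = dcheby1
--   elif m >= 2:
--     for i in range(2,m+1):
--       dchebyn = 2*cheby(i-1,r) + 2*r*dcheby1 - dcheby0
--       dcheby0 = dcheby1
--       dcheby1 = dchebyn
--     dcheby = dchebyn
--   return dcheby
--
-- def ddcheby(m,r):
--   ddcheby0 = 0
--   ddcheby1 = 0
--   ddchebyn = 0
--   if m == 0:
--     ddcheby = ddcheby0
--   elif m == 1:
--     ddcheby = ddcheby1
--   elif m >= 2:
--     for i in range(2,m+1):
--       ddchebyn = 4*dcheby(i-1,r) + 2*r*ddcheby1 - ddcheby0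
--       ddcheby0 = ddcheby1
--       ddcheby1 = ddchebyn
--     ddcheby = ddchebyn
--   return ddcheby
-- ===== SOURCE B (Python) =====
-- def ddcheby(m, r):
--     # Single pass maintaining T_n, T_n', T_n'' together (O(m) instead of O(m^3)).
--     t0, t1 = 1, r
--     d0, d1 = 0, 1
--     dd0, dd1 = 0, 0
--     for _ in range(2, m + 1):
--         t0, t1 = t1, 2 * r * t1 - t0
--         d0, d1 = d1, 2 * t0 + 2 * r * d1 - d0
--         dd0, dd1 = dd1, 4 * d0 + 2 * r * dd1 - dd0
--     return dd1
-- ===== Notes on version B (the rewrite author's own statement) =====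
-- stated objective: faster
-- what changed: Replaced the triply nested recurrences (ddcheby's loop calls dcheby, whose loop calls cheby) with one single pass that advances T_n, T_n' and T_n'' together, so all inner re-computations disappear.
import Mathlib
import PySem

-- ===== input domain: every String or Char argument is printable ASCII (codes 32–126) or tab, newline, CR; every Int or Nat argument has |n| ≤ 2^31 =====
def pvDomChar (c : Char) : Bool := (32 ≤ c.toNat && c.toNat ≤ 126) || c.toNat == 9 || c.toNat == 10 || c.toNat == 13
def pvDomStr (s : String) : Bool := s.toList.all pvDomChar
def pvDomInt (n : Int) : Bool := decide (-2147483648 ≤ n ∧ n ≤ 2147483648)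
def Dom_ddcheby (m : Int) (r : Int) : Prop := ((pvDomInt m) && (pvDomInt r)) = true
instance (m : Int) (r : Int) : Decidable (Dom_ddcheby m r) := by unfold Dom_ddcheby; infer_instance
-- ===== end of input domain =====

-- B replaces A's triply nested recurrences by one pass advancing T, T' and T'' together (asymptotically faster).

-- ===== PORT A =====
-- loop of cheby: state (cheby0, cheby1, chebyn), iterated (m-1) times
def chebyLoopA (r : Int) : Nat → Int × Int × Int → Int × Int × Int
  | 0, st => st
  | n+1, (c0, c1, _) => chebyLoopA r n (c1, 2*r*c1 - c0, 2*r*c1 - c0)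

def chebyA (m : Int) (r : Int) : Int :=
  if m = 0 then 1
  else if m = 1 then r
  else if 2 ≤ m then (chebyLoopA r (m-1).toNat (1, r, 0)).2.2
  else 0  -- Python: UnboundLocalError for m < 0 (outside Pre_)

-- loop of dcheby: state (dcheby0, dcheby1, dchebyn), i the current range(2, m+1) index
def dchebyLoopA (r : Int) : Nat → Int → Int × Int × Int → Int × Int × Int
  | 0, _, st => st
  | n+1, i, (d0, d1, _) =>
      dchebyLoopA r n (i+1) (d1, 2*chebyA (i-1) r + 2*r*d1 - d0, 2*chebyA (i-1) r + 2*r*d1 - d0)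

def dchebyA (m : Int) (r : Int) : Int :=
  if m = 0 then 0
  else if m = 1 then 1
  else if 2 ≤ m then (dchebyLoopA r (m-1).toNat 2 (0, 1, 0)).2.2
  else 0  -- Python: UnboundLocalError for m < 0 (outside Pre_)

-- loop of ddcheby: state (ddcheby0, ddcheby1, ddchebyn)
def ddchebyLoopA (r : Int) : Nat → Int → Int × Int × Int → Int × Int × Int
  | 0, _, st => st
  | n+1, i, (d0, d1, _) =>
      ddchebyLoopA r n (i+1) (d1, 4*dchebyA (i-1) r + 2*r*d1 - d0, 4*dchebyA (i-1) r + 2*r*d1 - d0)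

def ddcheby (m : Int) (r : Int) : Int :=
  if m = 0 then 0
  else if m = 1 then 0
  else if 2 ≤ m then (ddchebyLoopA r (m-1).toNat 2 (0, 0, 0)).2.2
  else 0  -- Python: UnboundLocalError for m < 0 (outside Pre_)

-- ===== PORT B =====
-- single pass: state (t0, t1, d0, d1, dd0, dd1), iterated (m-1) times
def ddchebyLoopB (r : Int) : Nat → Int × Int × Int × Int × Int × Int → Int × Int × Int × Int × Int × Int
  | 0, st => st
  | n+1, (t0, t1, d0, d1, dd0, dd1) =>
      ddchebyLoopB r n (t1, 2*r*t1 - t0, d1, 2*t1 + 2*r*d1 - d0, dd1, 4*d1 + 2*r*dd1 - dd0)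

def ddcheby_alt (m : Int) (r : Int) : Int :=
  (ddchebyLoopB r (m-1).toNat (1, r, 0, 1, 0, 0)).2.2.2.2.2

-- ===== PRECONDITION & SPEC =====
-- Pre_ excludes m < 0, where Python A raises UnboundLocalError (no branch assigns the result).
def Pre_ddcheby (m : Int) (r : Int) : Prop := 0 ≤ m
instance (m : Int) (r : Int) : Decidable (Pre_ddcheby m r) := by unfold Pre_ddcheby; infer_instance
def pvWitness_ddcheby : Int × Int := (3, 2)

def Spec_ddcheby (m : Int) (r : Int) (out : Int) : Prop := out = ddcheby_alt m r
instance (m : Int) (r : Int) (out : Int) : Decidable (Spec_ddcheby m r out) := by unfold Spec_ddcheby; infer_instance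

-- ===== CLAIM (what is proved, stated in full; the proofs are below) =====
def Claim_equal_ddcheby : Prop := ∀ (m : Int) (r : Int), Dom_ddcheby m r → Pre_ddcheby m r → Spec_ddcheby m r (ddcheby m r)

-- ===== LEMMAS AND PROOFS =====

-- reference recurrences: T_n, T_n', T_n''
def Tn (r : Int) : Nat → Int
  | 0 => 1
  | 1 => r
  | n+2 => 2*r*Tn r (n+1) - Tn r n

def Dn (r : Int) : Nat → Int
  | 0 => 0
  | 1 => 1
  | n+2 => 2*Tn r (n+1) + 2*r*Dn r (n+1) - Dn r n

def DDn (r : Int) : Nat → Int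
  | 0 => 0
  | 1 => 0
  | n+2 => 4*Dn r (n+1) + 2*r*DDn r (n+1) - DDn r n

theorem chebyLoopA_eq (r : Int) : ∀ (n j : Nat) (x : Int),
    chebyLoopA r (n+1) (Tn r j, Tn r (j+1), x)
      = (Tn r (j+n+1), Tn r (j+n+2), Tn r (j+n+2)) := by
  intro n
  induction n with
  | zero => intro j x; simp [chebyLoopA, Tn]
  | succ k ih =>
      intro j x
      have h1 : chebyLoopA r (k+2) (Tn r j, Tn r (j+1), x)
          = chebyLoopA r (k+1) (Tn r (j+1), Tn r (j+2), Tn r (j+2)) := by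
        simp [chebyLoopA, Tn]
      rw [h1, ih (j+1)]
      ring_nf

theorem chebyA_eq (r : Int) : ∀ (n : Nat), chebyA (n : Int) r = Tn r n := by
  intro n
  match n with
  | 0 => simp [chebyA, Tn]
  | 1 => simp [chebyA, Tn]
  | k+2 =>
      have h0 : ((k+2 : Nat) : Int) ≠ 0 := by omega
      have h1 : ((k+2 : Nat) : Int) ≠ 1 := by omega
      have h2 : (2 : Int) ≤ ((k+2 : Nat) : Int) := by omega
      have ht : (((k+2 : Nat) : Int) - 1).toNat = k + 1 := by omega
      simp only [chebyA, h0, h1, h2, if_false, if_true, ht]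
      have := chebyLoopA_eq r k 0 0
      simp only [Nat.zero_add] at this
      rw [show Tn r 0 = 1 from rfl, show Tn r 1 = r from rfl] at this
      rw [this]

theorem dchebyLoopA_eq (r : Int) : ∀ (n j : Nat) (x : Int),
    dchebyLoopA r (n+1) ((j : Int)+2) (Dn r j, Dn r (j+1), x)
      = (Dn r (j+n+1), Dn r (j+n+2), Dn r (j+n+2)) := by
  intro n
  induction n with
  | zero =>
      intro j x
      have hc : chebyA ((j : Int)+2-1) r = Tn r (j+1) := by
        have : ((j : Int)+2-1) = ((j+1 : Nat) : Int) := by push_cast; ring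
        rw [this, chebyA_eq]
      simp [dchebyLoopA, hc, Dn]
  | succ k ih =>
      intro j x
      have hc : chebyA ((j : Int)+2-1) r = Tn r (j+1) := by
        have : ((j : Int)+2-1) = ((j+1 : Nat) : Int) := by push_cast; ring
        rw [this, chebyA_eq]
      have h1 : dchebyLoopA r (k+2) ((j : Int)+2) (Dn r j, Dn r (j+1), x)
          = dchebyLoopA r (k+1) (((j+1 : Nat) : Int)+2) (Dn r (j+1), Dn r (j+2), Dn r (j+2)) := by
        simp only [dchebyLoopA, hc]
        have harg : (j : Int) + 2 + 1 = ((j+1 : Nat) : Int) + 2 := by push_cast; ring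
        rw [harg]
        rfl
      rw [h1, ih (j+1)]
      ring_nf

theorem dchebyA_eq (r : Int) : ∀ (n : Nat), dchebyA (n : Int) r = Dn r n := by
  intro n
  match n with
  | 0 => simp [dchebyA, Dn]
  | 1 => simp [dchebyA, Dn]
  | k+2 =>
      have h0 : ((k+2 : Nat) : Int) ≠ 0 := by omega
      have h1 : ((k+2 : Nat) : Int) ≠ 1 := by omega
      have h2 : (2 : Int) ≤ ((k+2 : Nat) : Int) := by omega
      have ht : (((k+2 : Nat) : Int) - 1).toNat = k + 1 := by omega
      simp only [dchebyA, h0, h1, h2, if_false, if_true, ht]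
      have := dchebyLoopA_eq r k 0 0
      simp only [Nat.cast_zero, zero_add] at this
      rw [show Dn r 0 = 0 from rfl, show Dn r 1 = 1 from rfl] at this
      rw [this]

theorem ddchebyLoopA_eq (r : Int) : ∀ (n j : Nat) (x : Int),
    ddchebyLoopA r (n+1) ((j : Int)+2) (DDn r j, DDn r (j+1), x)
      = (DDn r (j+n+1), DDn r (j+n+2), DDn r (j+n+2)) := by
  intro n
  induction n with
  | zero =>
      intro j x
      have hc : dchebyA ((j : Int)+2-1) r = Dn r (j+1) := by
        have : ((j : Int)+2-1) = ((j+1 : Nat) : Int) := by push_cast; ring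
        rw [this, dchebyA_eq]
      simp [ddchebyLoopA, hc, DDn]
  | succ k ih =>
      intro j x
      have hc : dchebyA ((j : Int)+2-1) r = Dn r (j+1) := by
        have : ((j : Int)+2-1) = ((j+1 : Nat) : Int) := by push_cast; ring
        rw [this, dchebyA_eq]
      have h1 : ddchebyLoopA r (k+2) ((j : Int)+2) (DDn r j, DDn r (j+1), x)
          = ddchebyLoopA r (k+1) (((j+1 : Nat) : Int)+2) (DDn r (j+1), DDn r (j+2), DDn r (j+2)) := by
        simp only [ddchebyLoopA, hc]
        have harg : (j : Int) + 2 + 1 = ((j+1 : Nat) : Int) + 2 := by push_cast; ring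
        rw [harg]
        rfl
      rw [h1, ih (j+1)]
      ring_nf

theorem ddchebyA_eq (r : Int) : ∀ (n : Nat), ddcheby (n : Int) r = DDn r n := by
  intro n
  match n with
  | 0 => simp [ddcheby, DDn]
  | 1 => simp [ddcheby, DDn]
  | k+2 =>
      have h0 : ((k+2 : Nat) : Int) ≠ 0 := by omega
      have h1 : ((k+2 : Nat) : Int) ≠ 1 := by omega
      have h2 : (2 : Int) ≤ ((k+2 : Nat) : Int) := by omega
      have ht : (((k+2 : Nat) : Int) - 1).toNat = k + 1 := by omega
      simp only [ddcheby, h0, h1, h2, if_false, if_true, ht]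
      have := ddchebyLoopA_eq r k 0 0
      simp only [Nat.cast_zero, zero_add] at this
      rw [show DDn r 0 = 0 from rfl, show DDn r 1 = 0 from rfl] at this
      rw [this]

theorem ddchebyLoopB_eq (r : Int) : ∀ (n j : Nat),
    ddchebyLoopB r n (Tn r j, Tn r (j+1), Dn r j, Dn r (j+1), DDn r j, DDn r (j+1))
      = (Tn r (j+n), Tn r (j+n+1), Dn r (j+n), Dn r (j+n+1), DDn r (j+n), DDn r (j+n+1)) := by
  intro n
  induction n with
  | zero => intro j; simp [ddchebyLoopB]
  | succ k ih =>
      intro j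
      have h1 : ddchebyLoopB r (k+1) (Tn r j, Tn r (j+1), Dn r j, Dn r (j+1), DDn r j, DDn r (j+1))
          = ddchebyLoopB r k (Tn r (j+1), Tn r (j+2), Dn r (j+1), Dn r (j+2), DDn r (j+1), DDn r (j+2)) := by
        simp [ddchebyLoopB, Tn, Dn, DDn]
      rw [h1, ih (j+1)]
      ring_nf

theorem ddchebyAlt_eq (r : Int) : ∀ (n : Nat), ddcheby_alt (n : Int) r = DDn r n := by
  intro n
  match n with
  | 0 =>
      simp only [ddcheby_alt]
      norm_num
      rfl
  | k+1 =>
      have ht : (((k+1 : Nat) : Int) - 1).toNat = k := by omega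
      simp only [ddcheby_alt, ht]
      have := ddchebyLoopB_eq r k 0
      simp only [Nat.zero_add] at this
      rw [show Tn r 0 = 1 from rfl, show Tn r 1 = r from rfl,
          show Dn r 0 = 0 from rfl, show Dn r 1 = 1 from rfl,
          show DDn r 0 = 0 from rfl, show DDn r 1 = 0 from rfl] at this
      rw [this]

-- ===== VERDICT (by name: the statement is the Claim_ definition above) =====
theorem ddcheby_spec : Claim_equal_ddcheby := by
  intro m r _ hpre
  obtain ⟨n, rfl⟩ : ∃ n : Nat, m = (n : Int) := ⟨m.toNat, (Int.toNat_of_nonneg hpre).symm⟩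
  unfold Spec_ddcheby
  rw [ddchebyA_eq, ddchebyAlt_eq]
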